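-- pv_equiv track=rewrite | github.com/wwang487/RipOperation | Utils/SideFunc/dataInteraction.py | create_bin_tuple_list
-- ===== SOURCE A (Python) =====
-- def create_bin_tuple_list(vals):
--     res = []
--     for i in range(len(vals)):
--         if i == 0:
--             res.append((-999, vals[i]))
--         elif i == len(vals) - 1:
--             res.append((vals[i], 999999))
--         else:
--             res.append((vals[i], vals[i + 1]))
--     return res
-- ===== SOURCE B (Python) =====
-- def create_bin_tuple_list(vals):
--     if not vals:
--         return []
--     if len(vals) == 1:
--         return [(-999, vals[0])]
--     head = [(-999, vals[0])]
--     mid = list(zip(vals[1:], vals[2:]))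
--     tail = [(vals[-1], 999999)]
--     return head + mid + tail
-- ===== Notes on version B (the rewrite author's own statement) =====
-- stated objective: simpler
-- what changed: Replaces the index loop with a per-index three-way branch by a direct head ++ zip(vals[1:], vals[2:]) ++ tail construction with the degenerate empty and singleton cases handled up front.
import Mathlib
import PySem

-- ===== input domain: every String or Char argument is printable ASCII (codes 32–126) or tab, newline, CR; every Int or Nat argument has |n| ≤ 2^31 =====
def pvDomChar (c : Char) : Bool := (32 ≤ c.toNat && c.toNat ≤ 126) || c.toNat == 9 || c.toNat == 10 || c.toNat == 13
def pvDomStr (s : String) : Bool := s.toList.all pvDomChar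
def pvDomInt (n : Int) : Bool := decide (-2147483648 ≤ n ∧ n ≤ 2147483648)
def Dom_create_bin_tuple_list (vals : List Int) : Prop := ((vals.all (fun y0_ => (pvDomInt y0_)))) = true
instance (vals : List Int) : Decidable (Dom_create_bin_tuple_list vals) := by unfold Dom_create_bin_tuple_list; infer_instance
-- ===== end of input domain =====

-- B replaces A's single index loop with per-index branching by a head / pairwise-zip middle / tail
-- decomposition (objective: simpler); same return value on every input.

-- ===== PORT A =====
-- literal port of A: index loop over range(len(vals)), branch on i, append one tuple per step
def create_bin_tuple_list (vals : List Int) : List (Int × Int) :=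
  (PySem.List.pyRange 0 (vals.length : Int) 1).foldl
    (fun res i =>
      res ++ [ if i = 0 then ((-999 : Int), PySem.List.pyGetD vals i 0)
               else if i = (vals.length : Int) - 1 then (PySem.List.pyGetD vals i 0, (999999 : Int))
               else (PySem.List.pyGetD vals i 0, PySem.List.pyGetD vals (i + 1) 0) ]) []

-- ===== PORT B =====
-- literal port of Source B: degenerate cases first, then head ++ zip(vals[1:], vals[2:]) ++ tail
def create_bin_tuple_list_alt (vals : List Int) : List (Int × Int) :=
  match vals with
  | [] => []
  | [v] => [((-999 : Int), v)]
  | v :: r :: t =>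
      [((-999 : Int), v)]
        ++ ((PySem.List.slice (v :: r :: t) (some 1) none).zip
              (PySem.List.slice (v :: r :: t) (some 2) none))
        ++ [(PySem.List.pyGetD (v :: r :: t) (-1) 0, (999999 : Int))]

-- ===== PRECONDITION & SPEC =====
def Spec_create_bin_tuple_list (vals : List Int) (out : List (Int × Int)) : Prop := out = create_bin_tuple_list_alt vals
instance (vals : List Int) (out : List (Int × Int)) : Decidable (Spec_create_bin_tuple_list vals out) := by unfold Spec_create_bin_tuple_list; infer_instance

-- ===== CLAIM (what is proved, stated in full; the proofs are below) =====
def Claim_equal_create_bin_tuple_list : Prop := ∀ (vals : List Int), Dom_create_bin_tuple_list vals → Spec_create_bin_tuple_list vals (create_bin_tuple_list vals)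

-- ===== LEMMAS AND PROOFS =====

-- common middle/tail shape both programs produce after the head tuple
def pvTail : List Int → List (Int × Int)
  | [] => []
  | [x] => [(x, 999999)]
  | x :: y :: t => (x, y) :: pvTail (y :: t)

-- A's loop body mapped over the indices s .. len-1 (s ≥ 1) yields pvTail of the dropped suffix
lemma pvA_map (vals : List Int) (l : List Int) (s : Nat) (h1 : 1 ≤ s)
    (hdrop : vals.drop s = l) (hlen : s + l.length = vals.length) :
    (PySem.List.pyRange (s : Int) (vals.length : Int) 1).map
      (fun i => if i = 0 then ((-999 : Int), PySem.List.pyGetD vals i 0)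
                else if i = (vals.length : Int) - 1 then (PySem.List.pyGetD vals i 0, (999999 : Int))
                else (PySem.List.pyGetD vals i 0, PySem.List.pyGetD vals (i + 1) 0))
      = pvTail l := by
  induction l generalizing s with
  | nil =>
      simp at hlen
      rw [PySem.List.pyRange_one_eq_nil (by omega)]
      simp [pvTail]
  | cons x t ih =>
      have hlen' : s + t.length + 1 = vals.length := by simp at hlen; omega
      have hs : (s : Int) < (vals.length : Int) := by omega
      rw [PySem.List.pyRange_one_cons hs]
      have hx : vals[s]? = some x := by
        have h := congrArg (fun ll => ll[0]?) hdrop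
        simpa [List.getElem?_drop] using h
      cases t with
      | nil =>
          rw [PySem.List.pyRange_one_eq_nil (by simp at hlen'; omega)]
          simp only [List.map_cons, List.map_nil, pvTail]
          rw [if_neg (by omega), if_pos (by simp at hlen'; omega)]
          rw [PySem.List.pyGetD_natCast]
          simp [List.getD_eq_getElem?_getD, hx]
      | cons y t' =>
          have hy : vals[s + 1]? = some y := by
            have h := congrArg (fun ll => ll[1]?) hdrop
            simpa [List.getElem?_drop] using h
          have hdrop' : vals.drop (s + 1) = y :: t' := by
            have h := congrArg (List.drop 1) hdrop
            simpa [List.drop_drop, Nat.add_comm] using h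
          have hrec := ih (s + 1) (by omega) hdrop' (by simp at hlen' ⊢; omega)
          push_cast at hrec
          simp only [List.map_cons]
          rw [hrec]
          rw [show pvTail (x :: y :: t') = (x, y) :: pvTail (y :: t') from rfl]
          congr 1
          rw [if_neg (by omega), if_neg (by simp at hlen'; omega)]
          rw [PySem.List.pyGetD_natCast,
              show ((s : Int) + 1) = ((s + 1 : Nat) : Int) by push_cast; ring,
              PySem.List.pyGetD_natCast]
          simp [List.getD_eq_getElem?_getD, hx, hy]

-- A computes head tuple :: pvTail of the rest
lemma pvA_eq (v : Int) (rest : List Int) :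
    create_bin_tuple_list (v :: rest) = ((-999 : Int), v) :: pvTail rest := by
  unfold create_bin_tuple_list
  rw [PySem.List.foldl_append_singleton_eq_map]
  have h0 : (0 : Int) < ((v :: rest).length : Int) := by simp
  rw [PySem.List.pyRange_one_cons h0]
  simp only [List.map_cons, List.nil_append, zero_add]
  have h := pvA_map (v :: rest) rest 1 le_rfl (by simp) (by simp [Nat.add_comm])
  push_cast at h
  rw [h]
  congr 1
  simp [PySem.List.pyGetD, PySem.List.pyGet?, PySem.List.pyIdx?]

-- zip of a list with its tail, plus the closing tuple, is pvTail
lemma pvB_tail (x : Int) (t : List Int) :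
    ((x :: t).zip t) ++ [(t.getLastD x, (999999 : Int))] = pvTail (x :: t) := by
  induction t generalizing x with
  | nil => simp [pvTail]
  | cons y t' ih =>
      show (x, y) :: ((y :: t').zip t') ++ [((y :: t').getLastD x, 999999)] = (x, y) :: pvTail (y :: t')
      rw [List.getLastD_cons, List.cons_append, ih y]

-- pyGetD with index -1 on a nonempty list is the last element
lemma pvGetLast (l : List Int) (h : l ≠ []) :
    PySem.List.pyGetD l (-1) 0 = l.getLastD 0 := by
  have hlen : 1 ≤ l.length := List.length_pos_iff.mpr h
  simp only [PySem.List.pyGetD, PySem.List.pyGet?, PySem.List.pyIdx?]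
  rw [if_neg (by omega), if_pos (by omega)]
  rw [List.getLastD_eq_getLast?, List.getLast?_eq_getElem?]
  simp

-- B computes head tuple :: pvTail of the rest on lists of length ≥ 2
lemma pvB_eq (v r : Int) (t : List Int) :
    create_bin_tuple_list_alt (v :: r :: t) = ((-999 : Int), v) :: pvTail (r :: t) := by
  simp only [create_bin_tuple_list_alt]
  rw [PySem.List.slice_from _ (by omega), PySem.List.slice_from _ (by omega),
      pvGetLast _ (by simp)]
  rw [show List.drop (Int.toNat 1) (v :: r :: t) = r :: t from rfl,
      show List.drop (Int.toNat 2) (v :: r :: t) = t from rfl]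
  simp only [List.cons_append, List.nil_append]
  rw [List.getLastD_cons, List.getLastD_cons, pvB_tail]

-- ===== VERDICT (by name: the statement is the Claim_ definition above) =====
theorem create_bin_tuple_list_spec : Claim_equal_create_bin_tuple_list := by
  intro vals _
  unfold Spec_create_bin_tuple_list
  match vals with
  | [] => rfl
  | [v] => rw [pvA_eq]; rfl
  | v :: r :: t => rw [pvA_eq, pvB_eq]
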